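-- pv_equiv track=rewrite | github.com/cse23-039/CTF-Solver | sidecar/solver/storage_retention.py | _truncate_by_size
-- ===== SOURCE A (Python) =====
-- def _truncate_by_size(lines: list[str], max_bytes: int) -> list[str]:
--     if max_bytes <= 0:
--         return lines
--     kept: list[str] = []
--     total = 0
--     for line in reversed(lines):
--         b = len(line.encode("utf-8", errors="ignore"))
--         if total + b > max_bytes:
--             break
--         kept.append(line)
--         total += b
--     kept.reverse()
--     return kept
-- ===== SOURCE B (Python) =====
-- def _truncate_by_size(lines: list[str], max_bytes: int) -> list[str]:
--     if max_bytes <= 0: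
--         return lines
--     sizes = [len(line.encode("utf-8", errors="ignore")) for line in lines]
--     total = sum(sizes)
--     i = 0
--     while total > max_bytes:
--         total -= sizes[i]
--         i += 1
--     return lines[i:]
-- ===== Notes on version B (the rewrite author's own statement) =====
-- stated objective: alternative
-- what changed: Instead of accumulating lines back-to-front with an early break and a final reverse, B computes all line sizes and the grand total in one pass and then trims whole lines from the front while the total exceeds the budget, returning a slice.
import Mathlib
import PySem

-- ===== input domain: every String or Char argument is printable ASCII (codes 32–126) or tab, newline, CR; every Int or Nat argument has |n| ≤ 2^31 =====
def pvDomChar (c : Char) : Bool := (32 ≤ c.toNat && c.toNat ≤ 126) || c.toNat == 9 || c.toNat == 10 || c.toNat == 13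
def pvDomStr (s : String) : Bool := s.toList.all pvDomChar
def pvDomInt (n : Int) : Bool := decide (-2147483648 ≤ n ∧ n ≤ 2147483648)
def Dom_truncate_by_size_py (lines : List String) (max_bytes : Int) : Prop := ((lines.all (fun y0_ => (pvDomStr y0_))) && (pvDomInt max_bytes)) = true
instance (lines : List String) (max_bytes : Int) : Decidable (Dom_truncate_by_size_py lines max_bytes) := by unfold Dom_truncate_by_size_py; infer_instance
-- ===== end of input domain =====

-- B replaces A's back-to-front accumulate-until-overflow (with a final reverse) by a two-phase
-- shape: compute all sizes and the grand total once, then trim lines from the FRONT while the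
-- total exceeds the budget and return a slice (objective: alternative, same cost).
-- len(line.encode("utf-8", errors="ignore")) is ported as PySem.Str.len: exact on the ASCII domain,
-- where the UTF-8 byte count equals the character count.

-- ===== PORT A =====
def truncAGo (mb : Int) : List String → List String → Int → List String
  | [], kept, _ => kept
  | line :: rest, kept, total =>
    let b := PySem.Str.len line
    if total + b > mb then kept else truncAGo mb rest (kept ++ [line]) (total + b)

def truncate_by_size_py (lines : List String) (max_bytes : Int) : List String :=
  if max_bytes ≤ 0 then lines
  else (truncAGo max_bytes lines.reverse [] 0).reverse

-- ===== PORT B =====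
def truncBGo (mb : Int) : List Int → Int → Nat → Nat
  | [], _, i => i
  | s :: rest, total, i => if total > mb then truncBGo mb rest (total - s) (i + 1) else i

def truncate_by_size_py_alt (lines : List String) (max_bytes : Int) : List String :=
  if max_bytes ≤ 0 then lines
  else
    let sizes := lines.map (fun line => PySem.Str.len line)
    lines.drop (truncBGo max_bytes sizes sizes.sum 0)

-- ===== CLAIM (what is proved, stated in full; the proofs are below) =====
def Spec_truncate_by_size_py (lines : List String) (max_bytes : Int) (out : List String) : Prop := out = truncate_by_size_py_alt lines max_bytes
instance (lines : List String) (max_bytes : Int) (out : List String) : Decidable (Spec_truncate_by_size_py lines max_bytes out) := by unfold Spec_truncate_by_size_py; infer_instance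

def Claim_equal_truncate_by_size_py : Prop := ∀ (lines : List String) (max_bytes : Int), Dom_truncate_by_size_py lines max_bytes → Spec_truncate_by_size_py lines max_bytes (truncate_by_size_py lines max_bytes)

-- ===== LEMMAS AND PROOFS =====

theorem pvLen_nonneg (s : String) : 0 ≤ PySem.Str.len s := by
  simp [PySem.Str.len_eq]

theorem pvSumLen_nonneg (xs : List String) : 0 ≤ (xs.map PySem.Str.len).sum := by
  apply List.sum_nonneg
  intro x hx
  simp only [List.mem_map] at hx
  obtain ⟨s, _, rfl⟩ := hx
  exact pvLen_nonneg s

-- A's loop takes everything when the whole remaining total fits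
theorem truncAGo_all (mb : Int) (ls : List String) (kept : List String) (t : Int)
    (h : t + (ls.map PySem.Str.len).sum ≤ mb) :
    truncAGo mb ls kept t = kept ++ ls := by
  induction ls generalizing kept t with
  | nil => simp [truncAGo]
  | cons l rest ih =>
    simp only [List.map_cons, List.sum_cons] at h
    have hr := pvSumLen_nonneg rest
    have hb : ¬ (t + PySem.Str.len l > mb) := by omega
    simp only [truncAGo, hb, if_false]
    rw [ih _ _ (by omega)]
    simp

-- behaviour of A's loop on a snoc: the last element is reached only if all of xs fits
theorem truncAGo_snoc (mb : Int) (xs : List String) (l : String) (kept : List String) (t : Int) :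
    truncAGo mb (xs ++ [l]) kept t =
      if t + (xs.map PySem.Str.len).sum + PySem.Str.len l ≤ mb then kept ++ xs ++ [l]
      else if t + (xs.map PySem.Str.len).sum ≤ mb then kept ++ xs
      else truncAGo mb xs kept t := by
  induction xs generalizing kept t with
  | nil =>
    simp only [List.nil_append, List.map_nil, List.sum_nil, add_zero, truncAGo,
      PySem.Str.len_eq, List.append_nil]
    split_ifs <;> first | rfl | omega
  | cons x xs' ih =>
    have hs' := pvSumLen_nonneg xs'
    have hl := pvLen_nonneg l
    simp only [List.cons_append, List.map_cons, List.sum_cons, truncAGo, PySem.Str.len_eq] at *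
    rw [ih]
    split_ifs <;> simp_all [List.append_assoc] <;> omega

theorem truncBGo_shift (mb : Int) (ss : List Int) (t : Int) (i : Nat) :
    truncBGo mb ss t (i + 1) = truncBGo mb ss t i + 1 := by
  induction ss generalizing t i with
  | nil => rfl
  | cons s rest ih =>
    simp only [truncBGo]
    split
    · exact ih _ _
    · rfl

-- the heart: A's kept-suffix equals B's front-trimmed slice
theorem main_lemma (mb : Int) (lines : List String) :
    (truncAGo mb lines.reverse [] 0).reverse
      = lines.drop (truncBGo mb (lines.map PySem.Str.len) (lines.map PySem.Str.len).sum 0) := by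
  induction lines with
  | nil => rfl
  | cons l rest ih =>
    simp only [List.reverse_cons, List.map_cons, List.sum_cons]
    have hrev : (rest.reverse.map PySem.Str.len).sum = (rest.map PySem.Str.len).sum := by
      rw [List.map_reverse, List.sum_reverse]
    by_cases htot : PySem.Str.len l + (rest.map PySem.Str.len).sum > mb
    · -- total overflows: B drops the head; A never reaches l
      rw [truncAGo_snoc, hrev]
      have h1 : ¬ (0 + (rest.map PySem.Str.len).sum + PySem.Str.len l ≤ mb) := by omega
      rw [if_neg h1]
      simp only [truncBGo, htot, if_pos]
      have hsub : PySem.Str.len l + (rest.map PySem.Str.len).sum - PySem.Str.len l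
          = (rest.map PySem.Str.len).sum := by ring
      rw [hsub, truncBGo_shift, List.drop_succ_cons]
      by_cases hrest : 0 + (rest.map PySem.Str.len).sum ≤ mb
      · rw [if_pos hrest]
        have hB : truncBGo mb (rest.map PySem.Str.len) (rest.map PySem.Str.len).sum 0 = 0 := by
          cases hsz : rest.map PySem.Str.len with
          | nil => rfl
          | cons s ss =>
            have hle : ¬ ((rest.map PySem.Str.len).sum > mb) := by omega
            rw [hsz, List.sum_cons] at hle
            have hc : ¬ (mb < s + ss.sum) := by omega
            simp [truncBGo, hc]
        rw [hB]
        simp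
      · rw [if_neg hrest]
        exact ih
    · -- everything fits: both keep all lines
      have hall : 0 + ((rest.reverse ++ [l]).map PySem.Str.len).sum ≤ mb := by
        simp only [List.map_append, List.sum_append, List.map_reverse, List.sum_reverse,
          List.map_cons, List.map_nil, List.sum_cons, List.sum_nil]
        omega
      rw [truncAGo_all mb _ _ _ hall]
      have hc : ¬ (mb < (l.length : Int) + (rest.map PySem.Str.len).sum) := by
        simpa using htot
      simp [truncBGo, hc]

-- ===== VERDICT (by name: the statement is the Claim_ definition above) =====
theorem truncate_by_size_py_spec : Claim_equal_truncate_by_size_py := by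
  intro lines mb _
  unfold Spec_truncate_by_size_py truncate_by_size_py truncate_by_size_py_alt
  by_cases h : mb ≤ 0
  · simp [h]
  · simp only [h, if_false]
    exact main_lemma mb lines
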